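-- pv_equiv track=rewrite | github.com/josieon/codingStudyPlaydata | 프로그래머스/lv0/120956. 옹알이 （1）/moneyless1989_옹알이 （1）.py | solution
-- ===== SOURCE A (Python) =====
-- def solution(babbling):
--     answer = 0
--     pron = ["aya", "ye", "woo", "ma"]
--     for x in babbling:
--         for y in pron:
--             x = x.replace(y, "_")
--         if x.replace("_", "") == "": answer += 1
--     return answer
-- ===== SOURCE B (Python) =====
-- def solution(babbling):
--     # Single left-to-right scan per word: repeatedly strip the allowed sound that
--     # is a prefix of the rest (the four sounds start with distinct letters, so the
--     # choice is deterministic).  No replace/sentinel pass as in A.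
--     def babblable(word):
--         rest = word
--         while rest:
--             for t in ("aya", "ye", "woo", "ma"):
--                 if rest.startswith(t):
--                     rest = rest[len(t):]
--                     break
--             else:
--                 return False
--         return True
--     return sum(1 for w in babbling if babblable(w))
-- ===== Notes on version B (the rewrite author's own statement) =====
-- stated objective: alternative
-- what changed: B decides each word by one greedy left-to-right prefix scan over the four allowed sounds instead of A's four sequential str.replace passes with a '_' sentinel plus a final strip-and-compare.
-- intended difference: On inputs containing a word that mixes underscores with allowed sounds (a concatenation of 'aya','ye','woo','ma','_' with at least one '_', e.g. '_' or 'ma_'), A counts the word because its '_' sentinel is stripped before the emptiness test, while B does not count it; a word containing '_' is not composed of allowed pronunciations, so B's count is the intended one. — e.g. on solution(["_"]): A returns 1, B returns 0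
import Mathlib
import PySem

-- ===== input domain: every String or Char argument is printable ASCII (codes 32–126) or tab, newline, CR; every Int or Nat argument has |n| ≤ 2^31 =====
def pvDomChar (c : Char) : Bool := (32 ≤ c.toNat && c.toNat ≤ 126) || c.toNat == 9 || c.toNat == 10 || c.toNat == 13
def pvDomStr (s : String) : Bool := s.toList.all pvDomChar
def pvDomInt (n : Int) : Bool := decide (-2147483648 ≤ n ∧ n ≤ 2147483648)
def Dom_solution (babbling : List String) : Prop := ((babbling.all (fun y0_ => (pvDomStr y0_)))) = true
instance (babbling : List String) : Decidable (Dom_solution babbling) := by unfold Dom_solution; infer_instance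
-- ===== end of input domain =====

-- B replaces A's four sequential str.replace passes (with a '_' sentinel and a final
-- strip-and-compare) by one greedy left-to-right prefix scan per word; on words that mix
-- underscores with allowed sounds A's sentinel trick miscounts, and B returns the intended
-- count there (see D_solution below).

-- ===== PORT A =====
def solution (babbling : List String) : Int :=
  babbling.foldl
    (fun answer x =>
      let x := (["aya", "ye", "woo", "ma"] : List String).foldl
        (fun x y => PySem.Str.replace x y "_") x
      if PySem.Str.replace x "_" "" == "" then answer + 1 else answer)
    0

-- ===== PORT B =====
-- the per-word `while rest:` loop of Source B (fuel = initial length, a pure totality device: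
-- every iteration strips a nonempty prefix; rest[len(t):] with a literal nonnegative index
-- is exactly List.drop)
def babblableLoop : Nat → List Char → Bool
  | _, [] => true
  | 0, _ :: _ => false
  | fuel + 1, c :: t =>
    if PySem.Chars.startswith (c :: t) ['a', 'y', 'a'] then babblableLoop fuel ((c :: t).drop 3)
    else if PySem.Chars.startswith (c :: t) ['y', 'e'] then babblableLoop fuel ((c :: t).drop 2)
    else if PySem.Chars.startswith (c :: t) ['w', 'o', 'o'] then babblableLoop fuel ((c :: t).drop 3)
    else if PySem.Chars.startswith (c :: t) ['m', 'a'] then babblableLoop fuel ((c :: t).drop 2)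
    else false
termination_by structural fuel => fuel

def babblableB (l : List Char) : Bool := babblableLoop l.length l

def solution_alt (babbling : List String) : Int :=
  babbling.foldl (fun acc w => if babblableB w.toList then acc + 1 else acc) 0

-- ===== PRECONDITION & SPEC =====
-- On inputs containing a word that is a concatenation of 'aya','ye','woo','ma','_' with at
-- least one '_' (e.g. ["_"] or ["ma_"]), A counts that word because its '_' sentinel is
-- stripped before the emptiness test, while B does not count it; a word containing '_' is
-- not composed of allowed pronunciations, so B's count is the intended one.
-- mixedTok decides membership in the language (aya|ye|woo|ma|_)* ; the greedy scan is exact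
-- because the five tokens start with five distinct characters.  It is a spec-level language
-- test, not either port's code (B's scan has no '_' token; A has no scan).
def mixedTok : List Char → Bool
  | [] => true
  | 'a' :: 'y' :: 'a' :: rest => mixedTok rest
  | 'y' :: 'e' :: rest => mixedTok rest
  | 'w' :: 'o' :: 'o' :: rest => mixedTok rest
  | 'm' :: 'a' :: rest => mixedTok rest
  | '_' :: rest => mixedTok rest
  | _ => false

def D_solution (babbling : List String) : Prop :=
  ∃ x ∈ babbling, '_' ∈ x.toList ∧ mixedTok x.toList = true
instance (babbling : List String) : Decidable (D_solution babbling) := by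
  unfold D_solution; infer_instance

def Spec_solution (babbling : List String) (out : Int) : Prop :=
  ¬ D_solution babbling → out = solution_alt babbling
instance (babbling : List String) (out : Int) : Decidable (Spec_solution babbling out) := by
  unfold Spec_solution; infer_instance

def pvDiffWitness_solution : List String := (["_"])
def pvDiffWitnessOut_solution : Int × Int := (1, 0)

-- ===== CLAIM (what is proved, stated in full; the proofs are below) =====
def Claim_unchanged_solution : Prop :=
  ∀ (babbling : List String), Dom_solution babbling → Spec_solution babbling (solution babbling)
def Claim_changed_solution : Prop :=
  Dom_solution (pvDiffWitness_solution) ∧ D_solution (pvDiffWitness_solution) ∧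
    solution (pvDiffWitness_solution) = pvDiffWitnessOut_solution.1 ∧
    solution_alt (pvDiffWitness_solution) = pvDiffWitnessOut_solution.2 ∧
    pvDiffWitnessOut_solution.1 ≠ pvDiffWitnessOut_solution.2
def Claim_exact_solution : Prop :=
  ∀ (babbling : List String), Dom_solution babbling → D_solution babbling →
    solution babbling ≠ solution_alt babbling

-- ===== LEMMAS AND PROOFS =====

theorem singleton_prefix_iff (a : Char) (l : List Char) : [a] <+: l ↔ l.head? = some a := by
  cases l with
  | nil => simp
  | cons c t => simp [List.cons_prefix_cons, eq_comm]

theorem babblableLoop_nil (f : Nat) : babblableLoop f [] = true := by cases f <;> rfl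

-- the grammar test, unfolded one step into the prefix-test form the proofs below use
theorem mixedTok_cons (c : Char) (t : List Char) :
    mixedTok (c :: t) =
      (if ['a', 'y', 'a'].isPrefixOf (c :: t) then mixedTok ((c :: t).drop 3)
      else if ['y', 'e'].isPrefixOf (c :: t) then mixedTok ((c :: t).drop 2)
      else if ['w', 'o', 'o'].isPrefixOf (c :: t) then mixedTok ((c :: t).drop 3)
      else if ['m', 'a'].isPrefixOf (c :: t) then mixedTok ((c :: t).drop 2)
      else if c = '_' then mixedTok t
      else false) := by
  rw [mixedTok.eq_def]
  split
  · rename_i heq; exact absurd heq (by simp)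
  · rename_i rest heq
    injection heq with hc ht; subst hc; subst ht
    rw [if_pos (by simp)]
    rfl
  · rename_i rest heq
    injection heq with hc ht; subst hc; subst ht
    rw [if_neg (by simp [List.isPrefixOf_iff_prefix, List.cons_prefix_cons]),
      if_pos (by simp)]
    rfl
  · rename_i rest heq
    injection heq with hc ht; subst hc; subst ht
    rw [if_neg (by simp [List.isPrefixOf_iff_prefix, List.cons_prefix_cons]),
      if_neg (by simp [List.isPrefixOf_iff_prefix, List.cons_prefix_cons]),
      if_pos (by simp)]
    rfl
  · rename_i rest heq
    injection heq with hc ht; subst hc; subst ht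
    rw [if_neg (by simp [List.isPrefixOf_iff_prefix, List.cons_prefix_cons]),
      if_neg (by simp [List.isPrefixOf_iff_prefix, List.cons_prefix_cons]),
      if_neg (by simp [List.isPrefixOf_iff_prefix, List.cons_prefix_cons]),
      if_pos (by simp)]
    rfl
  · rename_i rest heq
    injection heq with hc ht; subst hc; subst ht
    rw [if_neg (by simp [List.isPrefixOf_iff_prefix, List.cons_prefix_cons]),
      if_neg (by simp [List.isPrefixOf_iff_prefix, List.cons_prefix_cons]),
      if_neg (by simp [List.isPrefixOf_iff_prefix, List.cons_prefix_cons]),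
      if_neg (by simp [List.isPrefixOf_iff_prefix, List.cons_prefix_cons]),
      if_pos rfl]
  · rename_i hne1 hne2 hne3 hne4 hne5
    rw [if_neg ?na, if_neg ?ny, if_neg ?nw, if_neg ?nm, if_neg ?nu]
    case na =>
      rw [List.isPrefixOf_iff_prefix]
      rintro ⟨u, hu⟩
      exact hne1 u (by simpa using hu.symm)
    case ny =>
      rw [List.isPrefixOf_iff_prefix]
      rintro ⟨u, hu⟩
      exact hne2 u (by simpa using hu.symm)
    case nw =>
      rw [List.isPrefixOf_iff_prefix]
      rintro ⟨u, hu⟩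
      exact hne3 u (by simpa using hu.symm)
    case nm =>
      rw [List.isPrefixOf_iff_prefix]
      rintro ⟨u, hu⟩
      exact hne4 u (by simpa using hu.symm)
    case nu =>
      intro hc
      exact hne5 t (by rw [hc])

-- fuel-independence of B's scanning loop (fuel ≥ length)
theorem babblableLoop_congr : ∀ (f1 : Nat) (l : List Char) (f2 : Nat),
    l.length ≤ f1 → l.length ≤ f2 → babblableLoop f1 l = babblableLoop f2 l := by
  intro f1
  induction f1 with
  | zero =>
    intro l f2 h1 _
    have : l = [] := List.eq_nil_of_length_eq_zero (Nat.le_zero.mp h1)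
    subst this
    cases f2 <;> rfl
  | succ n ih =>
    intro l f2 h1 h2
    match l, f2 with
    | [], f2 => rw [babblableLoop_nil, babblableLoop_nil]
    | c :: t, 0 => simp at h2
    | c :: t, f2 + 1 =>
      show babblableLoop (n + 1) (c :: t) = babblableLoop (f2 + 1) (c :: t)
      rw [babblableLoop, babblableLoop]
      simp only [List.length_cons] at h1 h2
      have hd3 : ((c :: t).drop 3).length = t.length + 1 - 3 := by simp
      have hd2 : ((c :: t).drop 2).length = t.length + 1 - 2 := by simp
      split_ifs <;>
        first
          | rfl
          | (apply ih <;> omega)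

theorem babblableB_cons (c : Char) (t : List Char) :
    babblableB (c :: t) =
      (if PySem.Chars.startswith (c :: t) ['a', 'y', 'a'] then babblableB ((c :: t).drop 3)
      else if PySem.Chars.startswith (c :: t) ['y', 'e'] then babblableB ((c :: t).drop 2)
      else if PySem.Chars.startswith (c :: t) ['w', 'o', 'o'] then babblableB ((c :: t).drop 3)
      else if PySem.Chars.startswith (c :: t) ['m', 'a'] then babblableB ((c :: t).drop 2)
      else false) := by
  show babblableLoop ((c :: t).length) (c :: t) = _
  rw [show (c :: t).length = t.length + 1 from rfl, babblableLoop]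
  unfold babblableB
  have hd3 : ((c :: t).drop 3).length = t.length + 1 - 3 := by simp
  have hd2 : ((c :: t).drop 2).length = t.length + 1 - 2 := by simp
  split_ifs <;>
    first
      | rfl
      | (apply babblableLoop_congr <;> omega)

-- fuel-free reformulation of PySem.Chars.replace (for a nonempty pattern)
def rep (old new l : List Char) : List Char :=
  match l with
  | [] => []
  | c :: t =>
    if h : old.isPrefixOf (c :: t) = true ∧ old ≠ [] then
      new ++ rep old new ((c :: t).drop old.length)
    else c :: rep old new t
termination_by l.length
decreasing_by
  · have h1 : old.length ≤ (c :: t).length := (List.isPrefixOf_iff_prefix.mp h.1).length_le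
    have h3 : 0 < old.length := List.length_pos_iff.mpr h.2
    simp at h1 ⊢; omega
  · simp

theorem rep_nil (old new : List Char) : rep old new [] = [] := by simp [rep]

theorem rep_cons_pos (old new : List Char) (c : Char) (t : List Char)
    (h : old <+: (c :: t)) (h2 : old ≠ []) :
    rep old new (c :: t) = new ++ rep old new ((c :: t).drop old.length) := by
  rw [rep]; rw [dif_pos ⟨List.isPrefixOf_iff_prefix.mpr h, h2⟩]

theorem rep_cons_neg (old new : List Char) (c : Char) (t : List Char)
    (h : ¬ old <+: (c :: t)) :
    rep old new (c :: t) = c :: rep old new t := by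
  rw [rep]; rw [dif_neg (fun hc => h (List.isPrefixOf_iff_prefix.mp hc.1))]

theorem go_eq_rep (old new : List Char) (hne : old ≠ []) :
    ∀ (fuel : Nat) (l acc : List Char), l.length ≤ fuel →
      PySem.Chars.replace.go old new fuel l acc = acc.reverse ++ rep old new l := by
  intro fuel
  induction fuel with
  | zero =>
    intro l acc hl
    have : l = [] := List.eq_nil_of_length_eq_zero (Nat.le_zero.mp hl)
    subst this
    simp [PySem.Chars.replace.go, rep_nil]
  | succ n ih =>
    intro l acc hl
    match l with
    | [] => simp [PySem.Chars.replace.go, rep_nil]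
    | c :: t =>
      rw [PySem.Chars.replace.go]
      by_cases h : old.isPrefixOf (c :: t) = true
      · rw [if_pos h]
        have hlen : 0 < old.length := List.length_pos_iff.mpr hne
        have hdrop : ((c :: t).drop old.length).length ≤ n := by
          simp at hl ⊢; omega
        rw [ih _ _ hdrop, rep_cons_pos old new c t (List.isPrefixOf_iff_prefix.mp h) hne]
        simp
      · rw [if_neg h]
        have hlen : t.length ≤ n := by simp at hl; omega
        rw [ih _ _ hlen,
          rep_cons_neg old new c t (fun hc => h (List.isPrefixOf_iff_prefix.mpr hc))]
        simp

theorem replace_eq_rep (l old new : List Char) (hne : old ≠ []) :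
    PySem.Chars.replace l old new = rep old new l := by
  rw [PySem.Chars.replace, if_neg (by simpa using hne)]
  simpa using go_eq_rep old new hne l.length l [] le_rfl

-- the final x.replace("_", "") pass is List.filter
theorem rep_strip (l : List Char) :
    rep ['_'] [] l = l.filter (fun c => !(c == '_')) := by
  induction l with
  | nil => simp [rep_nil]
  | cons c t ih =>
    by_cases hc : c = '_'
    · subst hc
      rw [rep_cons_pos ['_'] [] '_' t (by simp) (by simp)]
      simpa using ih
    · rw [rep_cons_neg ['_'] [] c t (by simp [List.cons_prefix_cons]; exact fun h => hc h.symm)]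
      simp [hc, ih]

theorem head?_rep (old l : List Char) :
    (rep old ['_'] l).head? = l.head? ∨ (rep old ['_'] l).head? = some '_' := by
  match l with
  | [] => left; rw [rep_nil]
  | c :: t =>
    by_cases h : old.isPrefixOf (c :: t) = true ∧ old ≠ []
    · right; rw [rep, dif_pos h]; rfl
    · left; rw [rep, dif_neg h]; rfl

theorem oo_pres (old t : List Char)
    (h : ['o', 'o'] <+: rep old ['_'] t) : ['o', 'o'] <+: t := by
  match t with
  | [] => rw [rep_nil] at h; simp at h
  | c :: t' =>
    by_cases hg : old.isPrefixOf (c :: t') = true ∧ old ≠ []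
    · rw [rep, dif_pos hg] at h
      simp [List.cons_prefix_cons] at h
    · rw [rep, dif_neg hg] at h
      rw [List.cons_prefix_cons] at h ⊢
      obtain ⟨hc, h2⟩ := h
      refine ⟨hc, ?_⟩
      rw [singleton_prefix_iff] at h2 ⊢
      rcases head?_rep old t' with he | he
      · rw [← he]; exact h2
      · rw [he] at h2; simp at h2

-- the four-replace chain of A, over the fuel-free rep
def chainR (l : List Char) : List Char :=
  rep ['m', 'a'] ['_'] (rep ['w', 'o', 'o'] ['_'] (rep ['y', 'e'] ['_'] (rep ['a', 'y', 'a'] ['_'] l)))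

theorem chain_nil : chainR [] = [] := by simp [chainR, rep_nil]

theorem chain_aya (u : List Char) : chainR ('a' :: 'y' :: 'a' :: u) = '_' :: chainR u := by
  unfold chainR
  rw [rep_cons_pos ['a','y','a'] ['_'] 'a' ('y' :: 'a' :: u)
    (by simp [List.cons_prefix_cons]) (by simp)]
  simp only [List.length_cons, List.length_nil, List.drop_succ_cons, List.drop_zero,
    List.cons_append, List.nil_append]
  rw [rep_cons_neg ['y','e'] ['_'] '_' _ (by simp [List.cons_prefix_cons])]
  rw [rep_cons_neg ['w','o','o'] ['_'] '_' _ (by simp [List.cons_prefix_cons])]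
  rw [rep_cons_neg ['m','a'] ['_'] '_' _ (by simp [List.cons_prefix_cons])]

theorem chain_ye (u : List Char) : chainR ('y' :: 'e' :: u) = '_' :: chainR u := by
  unfold chainR
  rw [rep_cons_neg ['a','y','a'] ['_'] 'y' _ (by simp [List.cons_prefix_cons])]
  rw [rep_cons_neg ['a','y','a'] ['_'] 'e' _ (by simp [List.cons_prefix_cons])]
  rw [rep_cons_pos ['y','e'] ['_'] 'y' _ (by simp [List.cons_prefix_cons]) (by simp)]
  simp only [List.length_cons, List.length_nil, List.drop_succ_cons, List.drop_zero,
    List.cons_append, List.nil_append]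
  rw [rep_cons_neg ['w','o','o'] ['_'] '_' _ (by simp [List.cons_prefix_cons])]
  rw [rep_cons_neg ['m','a'] ['_'] '_' _ (by simp [List.cons_prefix_cons])]

theorem chain_woo (u : List Char) : chainR ('w' :: 'o' :: 'o' :: u) = '_' :: chainR u := by
  unfold chainR
  rw [rep_cons_neg ['a','y','a'] ['_'] 'w' _ (by simp [List.cons_prefix_cons])]
  rw [rep_cons_neg ['a','y','a'] ['_'] 'o' _ (by simp [List.cons_prefix_cons])]
  rw [rep_cons_neg ['a','y','a'] ['_'] 'o' _ (by simp [List.cons_prefix_cons])]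
  rw [rep_cons_neg ['y','e'] ['_'] 'w' _ (by simp [List.cons_prefix_cons])]
  rw [rep_cons_neg ['y','e'] ['_'] 'o' _ (by simp [List.cons_prefix_cons])]
  rw [rep_cons_neg ['y','e'] ['_'] 'o' _ (by simp [List.cons_prefix_cons])]
  rw [rep_cons_pos ['w','o','o'] ['_'] 'w' _ (by simp [List.cons_prefix_cons]) (by simp)]
  simp only [List.length_cons, List.length_nil, List.drop_succ_cons, List.drop_zero,
    List.cons_append, List.nil_append]
  rw [rep_cons_neg ['m','a'] ['_'] '_' _ (by simp [List.cons_prefix_cons])]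

theorem chain_ma_aya (v : List Char) :
    chainR ('m' :: 'a' :: 'y' :: 'a' :: v) = 'm' :: '_' :: chainR v := by
  unfold chainR
  rw [rep_cons_neg ['a','y','a'] ['_'] 'm' _ (by simp [List.cons_prefix_cons])]
  rw [rep_cons_pos ['a','y','a'] ['_'] 'a' _ (by simp [List.cons_prefix_cons]) (by simp)]
  simp only [List.length_cons, List.length_nil, List.drop_succ_cons, List.drop_zero,
    List.cons_append, List.nil_append]
  rw [rep_cons_neg ['y','e'] ['_'] 'm' _ (by simp [List.cons_prefix_cons])]
  rw [rep_cons_neg ['y','e'] ['_'] '_' _ (by simp [List.cons_prefix_cons])]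
  rw [rep_cons_neg ['w','o','o'] ['_'] 'm' _ (by simp [List.cons_prefix_cons])]
  rw [rep_cons_neg ['w','o','o'] ['_'] '_' _ (by simp [List.cons_prefix_cons])]
  rw [rep_cons_neg ['m','a'] ['_'] 'm' _ (by simp [List.cons_prefix_cons])]
  rw [rep_cons_neg ['m','a'] ['_'] '_' _ (by simp [List.cons_prefix_cons])]

theorem chain_ma (u : List Char) (h : ¬ ['y', 'a'] <+: u) :
    chainR ('m' :: 'a' :: u) = '_' :: chainR u := by
  unfold chainR
  rw [rep_cons_neg ['a','y','a'] ['_'] 'm' _ (by simp [List.cons_prefix_cons])]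
  rw [rep_cons_neg ['a','y','a'] ['_'] 'a' _ (by simp [List.cons_prefix_cons]; exact h)]
  rw [rep_cons_neg ['y','e'] ['_'] 'm' _ (by simp [List.cons_prefix_cons])]
  rw [rep_cons_neg ['y','e'] ['_'] 'a' _ (by simp [List.cons_prefix_cons])]
  rw [rep_cons_neg ['w','o','o'] ['_'] 'm' _ (by simp [List.cons_prefix_cons])]
  rw [rep_cons_neg ['w','o','o'] ['_'] 'a' _ (by simp [List.cons_prefix_cons])]
  rw [rep_cons_pos ['m','a'] ['_'] 'm' _ (by simp [List.cons_prefix_cons]) (by simp)]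
  simp only [List.length_cons, List.length_nil, List.drop_succ_cons, List.drop_zero,
    List.cons_append, List.nil_append]

-- a head that starts no token passes through all four replaces unchanged
theorem chain_skip (c : Char) (t : List Char)
    (h1 : ¬ ['a','y','a'] <+: (c :: t))
    (h2 : ¬ ['y','e'] <+: (c :: t))
    (h3 : ¬ ['w','o','o'] <+: (c :: t))
    (h4 : ¬ ['m','a'] <+: (c :: t)) :
    chainR (c :: t) = c :: chainR t := by
  unfold chainR
  rw [rep_cons_neg ['a','y','a'] ['_'] c t h1]
  rw [rep_cons_neg ['y','e'] ['_'] c _ ?hye]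
  rw [rep_cons_neg ['w','o','o'] ['_'] c _ ?hwoo]
  rw [rep_cons_neg ['m','a'] ['_'] c _ ?hma]
  case hye =>
    intro hb
    rw [List.cons_prefix_cons] at hb
    obtain ⟨hc, hh⟩ := hb
    rw [singleton_prefix_iff] at hh
    rcases head?_rep ['a','y','a'] t with he | he
    · rw [he] at hh
      exact h2 (List.cons_prefix_cons.mpr ⟨hc, (singleton_prefix_iff 'e' t).mpr hh⟩)
    · rw [he] at hh; simp at hh
  case hwoo =>
    intro hb
    rw [List.cons_prefix_cons] at hb
    obtain ⟨hc, hh⟩ := hb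
    exact h3 (List.cons_prefix_cons.mpr ⟨hc, oo_pres _ _ (oo_pres _ _ hh)⟩)
  case hma =>
    intro hb
    rw [List.cons_prefix_cons] at hb
    obtain ⟨hc, hh⟩ := hb
    rw [singleton_prefix_iff] at hh
    have hh' : t.head? = some 'a' := by
      rcases head?_rep ['w','o','o'] (rep ['y','e'] ['_'] (rep ['a','y','a'] ['_'] t)) with he | he
      · rw [he] at hh
        rcases head?_rep ['y','e'] (rep ['a','y','a'] ['_'] t) with he2 | he2
        · rw [he2] at hh
          rcases head?_rep ['a','y','a'] t with he3 | he3
          · rw [← he3]; exact hh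
          · rw [he3] at hh; simp at hh
        · rw [he2] at hh; simp at hh
      · rw [he] at hh; simp at hh
    exact h4 (List.cons_prefix_cons.mpr ⟨hc, (singleton_prefix_iff 'a' t).mpr hh'⟩)

-- the heart: A's condition (everything but '_' eliminated) is membership in (aya|ye|woo|ma|_)*
theorem chain_filter_iff (l : List Char) :
    ((chainR l).filter (fun c => !(c == '_')) = []) ↔ mixedTok l = true := by
  match l with
  | [] => simp [chain_nil]; rfl
  | c :: t =>
    rw [mixedTok_cons]
    by_cases h1 : ['a','y','a'] <+: (c :: t)
    · obtain ⟨u, hu⟩ := h1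
      have hu' : c :: t = 'a' :: 'y' :: 'a' :: u := by simpa using hu.symm
      rw [hu', chain_aya]
      rw [if_pos (by simp)]
      have := chain_filter_iff u
      simpa using this
    · by_cases h2 : ['y','e'] <+: (c :: t)
      · obtain ⟨u, hu⟩ := h2
        have hu' : c :: t = 'y' :: 'e' :: u := by simpa using hu.symm
        rw [hu', chain_ye]
        rw [if_neg (by rw [List.isPrefixOf_iff_prefix]; rw [hu'] at h1; exact h1),
          if_pos (by simp)]
        have := chain_filter_iff u
        simpa using this
      · by_cases h3 : ['w','o','o'] <+: (c :: t)
        · obtain ⟨u, hu⟩ := h3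
          have hu' : c :: t = 'w' :: 'o' :: 'o' :: u := by simpa using hu.symm
          rw [hu', chain_woo]
          rw [if_neg (by rw [List.isPrefixOf_iff_prefix]; rw [hu'] at h1; exact h1),
            if_neg (by rw [List.isPrefixOf_iff_prefix]; rw [hu'] at h2; exact h2),
            if_pos (by simp)]
          have := chain_filter_iff u
          simpa using this
        · by_cases h4 : ['m','a'] <+: (c :: t)
          · obtain ⟨u, hu⟩ := h4
            have hu' : c :: t = 'm' :: 'a' :: u := by simpa using hu.symm
            rw [hu']
            rw [if_neg (by rw [List.isPrefixOf_iff_prefix]; rw [hu'] at h1; exact h1),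
              if_neg (by rw [List.isPrefixOf_iff_prefix]; rw [hu'] at h2; exact h2),
              if_neg (by rw [List.isPrefixOf_iff_prefix]; rw [hu'] at h3; exact h3),
              if_pos (by simp)]
            by_cases h5 : ['y','a'] <+: u
            · obtain ⟨v, hv⟩ := h5
              have hv' : u = 'y' :: 'a' :: v := by simpa using hv.symm
              rw [hv', chain_ma_aya]
              rw [show List.drop 2 ('m' :: 'a' :: 'y' :: 'a' :: v) = 'y' :: 'a' :: v from rfl]
              rw [show mixedTok ('y' :: 'a' :: v) = false by
                rw [mixedTok_cons]
                rw [if_neg (by simp [List.isPrefixOf_iff_prefix, List.cons_prefix_cons]),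
                  if_neg (by simp [List.isPrefixOf_iff_prefix, List.cons_prefix_cons]),
                  if_neg (by simp [List.isPrefixOf_iff_prefix, List.cons_prefix_cons]),
                  if_neg (by simp [List.isPrefixOf_iff_prefix, List.cons_prefix_cons]),
                  if_neg (by simp)]]
              simp
            · rw [chain_ma u h5]
              rw [show List.drop 2 ('m' :: 'a' :: u) = u from rfl]
              have := chain_filter_iff u
              simpa using this
          · -- no token is a prefix
            rw [chain_skip c t h1 h2 h3 h4]
            rw [if_neg (by rw [List.isPrefixOf_iff_prefix]; exact h1),
              if_neg (by rw [List.isPrefixOf_iff_prefix]; exact h2),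
              if_neg (by rw [List.isPrefixOf_iff_prefix]; exact h3),
              if_neg (by rw [List.isPrefixOf_iff_prefix]; exact h4)]
            by_cases hc : c = '_'
            · subst hc
              rw [if_pos rfl]
              have := chain_filter_iff t
              simpa using this
            · rw [if_neg hc]
              simp [hc]
termination_by l.length
decreasing_by all_goals simp_all <;> omega

-- A's per-word condition, as membership in the mixed language
theorem A_word (x : String) :
    ((PySem.Str.replace ((["aya", "ye", "woo", "ma"] : List String).foldl
        (fun x y => PySem.Str.replace x y "_") x) "_" "" == "") = true)
      ↔ mixedTok x.toList = true := by
  rw [← chain_filter_iff]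
  simp only [List.foldl_cons, List.foldl_nil]
  have hlist : (PySem.Str.replace
      (PySem.Str.replace (PySem.Str.replace (PySem.Str.replace x "aya" "_") "ye" "_") "woo" "_")
      "ma" "_").toList = chainR x.toList := by
    simp only [PySem.Str.replace, String.toList_ofList]
    rw [show ("aya" : String).toList = ['a','y','a'] from by decide,
      show ("ye" : String).toList = ['y','e'] from by decide,
      show ("woo" : String).toList = ['w','o','o'] from by decide,
      show ("ma" : String).toList = ['m','a'] from by decide,
      show ("_" : String).toList = ['_'] from by decide]
    rw [replace_eq_rep _ _ _ (by simp), replace_eq_rep _ _ _ (by simp),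
      replace_eq_rep _ _ _ (by simp), replace_eq_rep _ _ _ (by simp)]
    rfl
  rw [beq_iff_eq]
  constructor
  · intro h
    have h2 := congrArg String.toList h
    rw [PySem.Str.replace, String.toList_ofList, hlist] at h2
    rw [show ("_" : String).toList = ['_'] from by decide,
      show ("" : String).toList = [] from by decide] at h2
    rw [replace_eq_rep _ _ _ (by simp), rep_strip] at h2
    simpa using h2
  · intro h
    have h2 : (PySem.Str.replace
        (PySem.Str.replace
          (PySem.Str.replace (PySem.Str.replace (PySem.Str.replace x "aya" "_") "ye" "_") "woo" "_")
          "ma" "_") "_" "").toList = [] := by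
      rw [PySem.Str.replace, String.toList_ofList, hlist]
      rw [show ("_" : String).toList = ['_'] from by decide,
        show ("" : String).toList = [] from by decide]
      rw [replace_eq_rep _ _ _ (by simp), rep_strip]
      exact h
    have h3 := congrArg String.ofList h2
    rwa [String.ofList_toList] at h3

-- B accepts exactly the underscore-free words of the mixed language
theorem B_word (l : List Char) :
    babblableB l = true ↔ (mixedTok l = true ∧ '_' ∉ l) := by
  match l with
  | [] => simp [babblableB]; rfl
  | c :: t =>
    rw [babblableB_cons, mixedTok_cons]
    by_cases h1 : ['a','y','a'] <+: (c :: t)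
    · obtain ⟨u, hu⟩ := h1
      have hu' : c :: t = 'a' :: 'y' :: 'a' :: u := by simpa using hu.symm
      rw [hu']
      rw [if_pos (by rw [PySem.Chars.startswith_iff]; exact ⟨u, by simp⟩),
        if_pos (by simp)]
      have := B_word u
      simp only [show List.drop 3 ('a' :: 'y' :: 'a' :: u) = u from rfl]
      rw [this]
      simp
    · by_cases h2 : ['y','e'] <+: (c :: t)
      · obtain ⟨u, hu⟩ := h2
        have hu' : c :: t = 'y' :: 'e' :: u := by simpa using hu.symm
        rw [hu']
        rw [if_neg (by rw [PySem.Chars.startswith_iff, hu'] at *; simpa using h1),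
          if_pos (by rw [PySem.Chars.startswith_iff]; exact ⟨u, by simp⟩),
          if_neg (by rw [List.isPrefixOf_iff_prefix]; rw [hu'] at h1; exact h1),
          if_pos (by simp)]
        have := B_word u
        simp only [show List.drop 2 ('y' :: 'e' :: u) = u from rfl]
        rw [this]
        simp
      · by_cases h3 : ['w','o','o'] <+: (c :: t)
        · obtain ⟨u, hu⟩ := h3
          have hu' : c :: t = 'w' :: 'o' :: 'o' :: u := by simpa using hu.symm
          rw [hu']
          rw [if_neg (by rw [PySem.Chars.startswith_iff]; rw [hu'] at h1; exact h1),
            if_neg (by rw [PySem.Chars.startswith_iff]; rw [hu'] at h2; exact h2),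
            if_pos (by rw [PySem.Chars.startswith_iff]; exact ⟨u, by simp⟩),
            if_neg (by rw [List.isPrefixOf_iff_prefix]; rw [hu'] at h1; exact h1),
            if_neg (by rw [List.isPrefixOf_iff_prefix]; rw [hu'] at h2; exact h2),
            if_pos (by simp)]
          have := B_word u
          simp only [show List.drop 3 ('w' :: 'o' :: 'o' :: u) = u from rfl]
          rw [this]
          simp
        · by_cases h4 : ['m','a'] <+: (c :: t)
          · obtain ⟨u, hu⟩ := h4
            have hu' : c :: t = 'm' :: 'a' :: u := by simpa using hu.symm
            rw [hu']
            rw [if_neg (by rw [PySem.Chars.startswith_iff]; rw [hu'] at h1; exact h1),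
              if_neg (by rw [PySem.Chars.startswith_iff]; rw [hu'] at h2; exact h2),
              if_neg (by rw [PySem.Chars.startswith_iff]; rw [hu'] at h3; exact h3),
              if_pos (by rw [PySem.Chars.startswith_iff]; exact ⟨u, by simp⟩),
              if_neg (by rw [List.isPrefixOf_iff_prefix]; rw [hu'] at h1; exact h1),
              if_neg (by rw [List.isPrefixOf_iff_prefix]; rw [hu'] at h2; exact h2),
              if_neg (by rw [List.isPrefixOf_iff_prefix]; rw [hu'] at h3; exact h3),
              if_pos (by simp)]
            have := B_word u
            simp only [show List.drop 2 ('m' :: 'a' :: u) = u from rfl]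
            rw [this]
            simp
          · rw [if_neg (by rw [PySem.Chars.startswith_iff]; exact h1),
              if_neg (by rw [PySem.Chars.startswith_iff]; exact h2),
              if_neg (by rw [PySem.Chars.startswith_iff]; exact h3),
              if_neg (by rw [PySem.Chars.startswith_iff]; exact h4),
              if_neg (by rw [List.isPrefixOf_iff_prefix]; exact h1),
              if_neg (by rw [List.isPrefixOf_iff_prefix]; exact h2),
              if_neg (by rw [List.isPrefixOf_iff_prefix]; exact h3),
              if_neg (by rw [List.isPrefixOf_iff_prefix]; exact h4)]
            by_cases hc : c = '_'
            · subst hc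
              rw [if_pos rfl]
              simp
            · rw [if_neg hc]
              simp
termination_by l.length
decreasing_by all_goals simp_all <;> omega

theorem solution_eq_countP (babbling : List String) :
    solution babbling = (babbling.countP (fun x => mixedTok x.toList) : Int) := by
  rw [solution]
  rw [show (fun (answer : Int) (x : String) =>
      let x := (["aya", "ye", "woo", "ma"] : List String).foldl
        (fun x y => PySem.Str.replace x y "_") x
      if PySem.Str.replace x "_" "" == "" then answer + 1 else answer) =
    (fun (answer : Int) (x : String) =>
      if (PySem.Str.replace ((["aya", "ye", "woo", "ma"] : List String).foldl
          (fun x y => PySem.Str.replace x y "_") x) "_" "" == "") then answer + 1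
      else answer) from rfl]
  rw [PySem.List.foldl_count_if]
  rw [List.countP_congr (fun x _ => A_word x)]
  simp

theorem solution_alt_eq_countP (babbling : List String) :
    solution_alt babbling = (babbling.countP (fun x => babblableB x.toList) : Int) := by
  rw [solution_alt, PySem.List.foldl_count_if]
  simp

theorem countP_lt_of_strict {α : Type} (p q : α → Bool) (l : List α)
    (h : ∀ a ∈ l, q a = true → p a = true) (x : α) (hx : x ∈ l)
    (hp : p x = true) (hq : q x = false) : l.countP q < l.countP p := by
  induction l with
  | nil => simp at hx
  | cons a l' ih =>
    rw [List.countP_cons, List.countP_cons]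
    rcases List.mem_cons.mp hx with rfl | hx'
    · have hle := List.countP_mono_left (p := q) (q := p) (l := l')
        (fun b hb => h b (List.mem_cons_of_mem _ hb))
      rw [hp, hq]
      simp
      omega
    · have hlt := ih (fun b hb => h b (List.mem_cons_of_mem _ hb)) hx'
      have : (if q a = true then 1 else 0) ≤ (if p a = true then 1 else 0) := by
        by_cases hqa : q a = true
        · rw [if_pos hqa, if_pos (h a List.mem_cons_self hqa)]
        · rw [if_neg hqa]; omega
      omega

-- ===== VERDICT (by name: the statement is the Claim_ definition above) =====
theorem solution_spec : Claim_unchanged_solution := by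
  intro babbling _ hnD
  rw [solution_eq_countP, solution_alt_eq_countP]
  congr 1
  apply List.countP_congr
  intro x hx
  rw [B_word]
  constructor
  · intro hm
    refine ⟨hm, fun hmem => hnD ⟨x, hx, hmem, hm⟩⟩
  · exact fun h => h.1

theorem solution_changed : Claim_changed_solution := by
  unfold Claim_changed_solution
  refine ⟨by decide, by decide, by decide, ?_, by decide⟩
  rw [solution_alt_eq_countP]
  decide

theorem solution_tight : Claim_exact_solution := by
  intro babbling _ hD
  obtain ⟨x, hx, hmem, hm⟩ := hD
  rw [solution_eq_countP, solution_alt_eq_countP]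
  have hlt := countP_lt_of_strict (fun x => mixedTok x.toList)
    (fun x => babblableB x.toList) babbling
    (fun a _ hq => ((B_word a.toList).mp hq).1) x hx hm
    (by rw [Bool.eq_false_iff]; intro hb; exact ((B_word x.toList).mp hb).2 hmem)
  intro hEq
  rw [Nat.cast_inj] at hEq
  omega
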